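-- pv_equiv track=rewrite | github.com/evankost/chatbot-office-assistant | backends/db_client.py | canonical_department
-- ===== SOURCE A (Python) =====
-- from typing import List, Dict, Any, Optional
--
-- DEPARTMENTS = {"R&D", "Operations", "UX", "Finance", "IT", "Sales", "HR"}
--
-- _DEPT_SYNONYMS = {
--     "R&D": {"r&d", "rnd", "research & development", "research and development"},
--     "Operations": {"operations", "ops"},
--     "UX": {"ux", "user experience", "design"},
--     "Finance": {"finance", "fin"},
--     "IT": {"it", "information technology", "it dept", "it department"},
--     "Sales": {"sales", "bizdev", "business development"},
--     "HR": {"hr", "human resources"},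
-- }
--
-- def _norm(s: Optional[str]) -> str:
--     return (s or "").strip().lower()
--
-- def canonical_department(s: Optional[str]) -> Optional[str]:
--     """Map free text to a canonical department or None."""
--     if not s:
--         return None
--     txt = _norm(s)
--     for canon in DEPARTMENTS:
--         if txt == _norm(canon):
--             return canon
--     for canon, toks in _DEPT_SYNONYMS.items():
--         if txt in toks:
--             return canon
--     txt = txt.replace(" department", "").replace(" dept", "").strip()
--     for canon in DEPARTMENTS:
--         if txt == _norm(canon):
--             return canon
--     for canon, toks in _DEPT_SYNONYMS.items():
--         if txt in toks:
--             return canon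
--     return None
-- ===== SOURCE B (Python) =====
-- from typing import Optional
--
-- DEPARTMENTS = {"R&D", "Operations", "UX", "Finance", "IT", "Sales", "HR"}
--
-- _DEPT_SYNONYMS = {
--     "R&D": {"r&d", "rnd", "research & development", "research and development"},
--     "Operations": {"operations", "ops"},
--     "UX": {"ux", "user experience", "design"},
--     "Finance": {"finance", "fin"},
--     "IT": {"it", "information technology", "it dept", "it department"},
--     "Sales": {"sales", "bizdev", "business development"},
--     "HR": {"hr", "human resources"},
-- }
--
-- def _norm(s: Optional[str]) -> str:
--     return (s or "").strip().lower()
--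
-- # One precomputed index: every normalized canonical name and every synonym
-- # string maps straight to its canonical department name.
-- _LOOKUP = {}
-- for _canon in DEPARTMENTS:
--     _LOOKUP[_norm(_canon)] = _canon
-- for _canon, _toks in _DEPT_SYNONYMS.items():
--     for _t in _toks:
--         _LOOKUP[_t] = _canon
--
-- def canonical_department(s: Optional[str]) -> Optional[str]:
--     """Map free text to a canonical department or None."""
--     if not s:
--         return None
--     txt = _norm(s)
--     hit = _LOOKUP.get(txt)
--     if hit is not None:
--         return hit
--     txt2 = txt.replace(" department", "").replace(" dept", "").strip()
--     return _LOOKUP.get(txt2)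
-- ===== Notes on version B (the rewrite author's own statement) =====
-- stated objective: simpler
-- what changed: Replaces the four scan-loops (two passes over DEPARTMENTS plus two over the synonym sets, re-normalizing each canonical name on every call) with a single module-level dict merging normalized names and synonyms to their canonical name, so the function body is just two table lookups.
import Mathlib
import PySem

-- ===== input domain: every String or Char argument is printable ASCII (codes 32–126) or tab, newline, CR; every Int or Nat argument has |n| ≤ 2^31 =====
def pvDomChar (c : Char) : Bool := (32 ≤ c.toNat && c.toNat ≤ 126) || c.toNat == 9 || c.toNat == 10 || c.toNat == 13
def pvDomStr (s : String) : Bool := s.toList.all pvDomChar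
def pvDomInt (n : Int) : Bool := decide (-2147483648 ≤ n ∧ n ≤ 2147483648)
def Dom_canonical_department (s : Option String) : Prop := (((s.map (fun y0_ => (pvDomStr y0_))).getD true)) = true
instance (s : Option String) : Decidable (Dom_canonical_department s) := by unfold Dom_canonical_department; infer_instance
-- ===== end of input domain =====

-- B replaces A's four scan-loops by one precomputed name/synonym → canonical index (simpler body).

-- ===== PORT A =====
-- DEPARTMENTS (a Python set literal, iterated in its runtime order; any order yields the same result)
def pvDepts : List String := ["R&D", "Operations", "UX", "Finance", "IT", "Sales", "HR"]

-- _DEPT_SYNONYMS: dict of canon → set of synonym strings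
def pvSyns : List (String × List String) :=
  [("R&D", ["r&d", "rnd", "research & development", "research and development"]),
   ("Operations", ["operations", "ops"]),
   ("UX", ["ux", "user experience", "design"]),
   ("Finance", ["finance", "fin"]),
   ("IT", ["it", "information technology", "it dept", "it department"]),
   ("Sales", ["sales", "bizdev", "business development"]),
   ("HR", ["hr", "human resources"])]

-- _norm on a non-None string
def pvNorm (s : String) : String := PySem.Str.lower (PySem.Str.strip s)

-- txt.replace(" department", "").replace(" dept", "").strip()  (same expression in A and B)
def pvStripDept (txt : String) : String :=
  PySem.Str.strip (PySem.Str.replace (PySem.Str.replace txt " department" "") " dept" "")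

-- first/third for-loop: over DEPARTMENTS, return canon if txt == _norm(canon)
def pvScanDepts (txt : String) : Option String :=
  pvDepts.find? (fun canon => txt == pvNorm canon)

-- second/fourth for-loop: over _DEPT_SYNONYMS.items(), return canon if txt in toks
def pvScanSyns (txt : String) : Option String :=
  (pvSyns.find? (fun p => p.2.contains txt)).map (·.1)

def canonical_department (s : Option String) : Option String :=
  match s with
  | none => none
  | some str =>
    if str = "" then none  -- 'if not s'
    else
      match pvScanDepts (pvNorm str) with
      | some c => some c
      | none =>
        match pvScanSyns (pvNorm str) with
        | some c => some c
        | none =>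
          match pvScanDepts (pvStripDept (pvNorm str)) with
          | some c => some c
          | none => pvScanSyns (pvStripDept (pvNorm str))

-- ===== PORT B =====
-- _LOOKUP: the module-level dict Source B builds once (normalized names first, then
-- synonyms; duplicate keys overwrite in place with the same value)
def pvLookup : PySem.Dict String String :=
  PySem.Dict.ofList
    [("r&d", "R&D"), ("operations", "Operations"), ("ux", "UX"), ("finance", "Finance"),
     ("it", "IT"), ("sales", "Sales"), ("hr", "HR"),
     ("rnd", "R&D"), ("research & development", "R&D"), ("research and development", "R&D"),
     ("ops", "Operations"),
     ("user experience", "UX"), ("design", "UX"),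
     ("fin", "Finance"),
     ("information technology", "IT"), ("it dept", "IT"), ("it department", "IT"),
     ("bizdev", "Sales"), ("business development", "Sales"),
     ("human resources", "HR")]

def canonical_department_alt (s : Option String) : Option String :=
  match s with
  | none => none
  | some str =>
    if str = "" then none
    else
      match pvLookup.get? (pvNorm str) with
      | some hit => some hit
      | none => pvLookup.get? (pvStripDept (pvNorm str))

-- ===== PRECONDITION & SPEC =====
def Spec_canonical_department (s : Option String) (out : Option String) : Prop := out = canonical_department_alt s
instance (s : Option String) (out : Option String) : Decidable (Spec_canonical_department s out) := by unfold Spec_canonical_department; infer_instance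

-- ===== CLAIM (what is proved, stated in full; the proofs are below) =====
def Claim_equal_canonical_department : Prop := ∀ (s : Option String), Dom_canonical_department s → Spec_canonical_department s (canonical_department s)

-- ===== LEMMAS AND PROOFS =====

theorem pv_find?_cons_ite {α : Type} (p : α → Bool) (a : α) (l : List α) :
    List.find? p (a :: l) = if p a = true then some a else List.find? p l := by
  by_cases h : p a <;> simp [h]

theorem pv_get?_mk_cons (k x v : String) (rest : List (String × String)) :
    (PySem.Dict.mk ((k, v) :: rest)).get? x
      = if x = k then some v else (PySem.Dict.mk rest).get? x := by
  by_cases h : x = k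
  · subst h; rw [PySem.Dict.get?_mk_cons]; simp
  · have hk : (k == x) = false := beq_eq_false_iff_ne.mpr (Ne.symm h)
    rw [PySem.Dict.get?_mk_cons]
    simp [hk, h]

-- A's two consecutive scan-loops compute exactly a lookup in B's merged index.
set_option maxHeartbeats 2000000 in
theorem pvScan_eq_lookup (txt : String) :
    (match pvScanDepts txt with
     | some c => some c
     | none => pvScanSyns txt) = pvLookup.get? txt := by
  have hD : pvLookup = PySem.Dict.mk
    [("r&d", "R&D"), ("operations", "Operations"), ("ux", "UX"), ("finance", "Finance"),
     ("it", "IT"), ("sales", "Sales"), ("hr", "HR"),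
     ("rnd", "R&D"), ("research & development", "R&D"), ("research and development", "R&D"),
     ("ops", "Operations"),
     ("user experience", "UX"), ("design", "UX"),
     ("fin", "Finance"),
     ("information technology", "IT"), ("it dept", "IT"), ("it department", "IT"),
     ("bizdev", "Sales"), ("business development", "Sales"),
     ("human resources", "HR")] := by decide
  have h0 : pvNorm "R&D" = "r&d" := by decide
  have h1 : pvNorm "Operations" = "operations" := by decide
  have h2 : pvNorm "UX" = "ux" := by decide
  have h3 : pvNorm "Finance" = "finance" := by decide
  have h4 : pvNorm "IT" = "it" := by decide
  have h5 : pvNorm "Sales" = "sales" := by decide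
  have h6 : pvNorm "HR" = "hr" := by decide
  rw [hD]
  simp only [pvScanDepts, pvScanSyns, pvDepts, pvSyns, h0, h1, h2, h3, h4, h5, h6,
    pv_find?_cons_ite, List.find?_nil, List.contains_cons, List.contains_nil, Bool.or_false,
    pv_get?_mk_cons, Bool.or_eq_true, beq_iff_eq]
  clear hD h0 h1 h2 h3 h4 h5 h6
  by_cases k0 : txt = "r&d"
  · subst k0; decide
  by_cases k1 : txt = "operations"
  · subst k1; decide
  by_cases k2 : txt = "ux"
  · subst k2; decide
  by_cases k3 : txt = "finance"
  · subst k3; decide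
  by_cases k4 : txt = "it"
  · subst k4; decide
  by_cases k5 : txt = "sales"
  · subst k5; decide
  by_cases k6 : txt = "hr"
  · subst k6; decide
  by_cases k7 : txt = "rnd"
  · subst k7; decide
  by_cases k8 : txt = "research & development"
  · subst k8; decide
  by_cases k9 : txt = "research and development"
  · subst k9; decide
  by_cases k10 : txt = "ops"
  · subst k10; decide
  by_cases k11 : txt = "user experience"
  · subst k11; decide
  by_cases k12 : txt = "design"
  · subst k12; decide
  by_cases k13 : txt = "fin"
  · subst k13; decide
  by_cases k14 : txt = "information technology"
  · subst k14; decide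
  by_cases k15 : txt = "it dept"
  · subst k15; decide
  by_cases k16 : txt = "it department"
  · subst k16; decide
  by_cases k17 : txt = "bizdev"
  · subst k17; decide
  by_cases k18 : txt = "business development"
  · subst k18; decide
  by_cases k19 : txt = "human resources"
  · subst k19; decide
  simp [k0, k1, k2, k3, k4, k5, k6, k7, k8, k9, k10, k11, k12, k13, k14, k15, k16, k17, k18, k19, PySem.Dict.get?]

-- ===== VERDICT (by name: the statement is the Claim_ definition above) =====
theorem canonical_department_spec : Claim_equal_canonical_department := by
  intro s _
  unfold Spec_canonical_department canonical_department canonical_department_alt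
  match s with
  | none => rfl
  | some str =>
    by_cases h : str = ""
    · subst h; rfl
    · simp only [if_neg h]
      rw [← pvScan_eq_lookup (pvNorm str), ← pvScan_eq_lookup (pvStripDept (pvNorm str))]
      cases pvScanDepts (pvNorm str) <;> cases pvScanSyns (pvNorm str) <;>
        cases pvScanDepts (pvStripDept (pvNorm str)) <;>
        cases pvScanSyns (pvStripDept (pvNorm str)) <;> rfl
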